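-- pv_equiv track=rewrite | github.com/jojoaddress/LeetCode-Solutions | Python/LeetCode/Trie/TheLongestWord.py | longestWord2
-- ===== SOURCE A (Python) =====
-- from typing import List
--
-- def longestWord2(words: List[str]) -> str:
--     words.sort(key=lambda x: (-len(x), x),reverse=True)
--     longest = ""
--     candidates = {""}
--     for word in words:
--         if word[:-1] in candidates:
--             candidates.add(word)
--             longest = word
--     return longest
-- ===== SOURCE B (Python) =====
-- from typing import List
--
-- def longestWord2(words: List[str]) -> str:
--     # No sort: check each word's proper prefixes against the set of all words,
--     # and keep a running best (longest, then lexicographically smallest).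
--     # Return-value equivalent to A; unlike A, does not sort `words` in place.
--     present = set(words)
--     best = ""
--     for w in words:
--         if all(w[:i] in present for i in range(1, len(w))):
--             if len(w) > len(best) or (len(w) == len(best) and w < best):
--                 best = w
--     return best
-- ===== Notes on version B (the rewrite author's own statement) =====
-- stated objective: alternative
-- what changed: B drops A's global sort and incremental candidates set: it checks every proper prefix of each word against a prebuilt set of all words and keeps a running (longest, lexicographically-smallest) best in one pass over the original list; note A sorts `words` in place while B leaves it untouched (return values agree).
import Mathlib
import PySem

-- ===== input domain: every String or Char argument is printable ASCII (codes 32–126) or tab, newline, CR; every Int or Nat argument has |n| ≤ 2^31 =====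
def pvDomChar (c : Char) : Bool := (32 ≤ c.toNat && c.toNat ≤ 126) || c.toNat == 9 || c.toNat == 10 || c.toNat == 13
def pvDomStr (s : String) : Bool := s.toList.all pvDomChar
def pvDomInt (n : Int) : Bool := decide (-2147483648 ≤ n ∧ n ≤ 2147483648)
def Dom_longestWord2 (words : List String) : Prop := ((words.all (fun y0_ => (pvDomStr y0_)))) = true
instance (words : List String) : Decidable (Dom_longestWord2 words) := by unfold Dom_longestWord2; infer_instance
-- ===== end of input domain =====

-- B replaces A's sort + growing candidates set by a one-pass scan that checks each word's
-- proper prefixes against the set of all words and keeps a running (longest, lex-smallest) best.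
-- A sorts `words` in place; B does not — the equivalence proved here is about the RETURN value.

-- ===== PORT A =====
def longestWord2 (words : List String) : String :=
  -- words.sort(key=lambda x: (-len(x), x), reverse=True)
  let sortedW := PySem.List.sorted2 words (fun x => -(PySem.Str.len x)) (fun x => x) true
  (sortedW.foldl
    (fun (st : PySem.Set String × String) w =>
      if PySem.Set.contains st.1 (PySem.Str.slice w none (some (-1))) then
        (PySem.Set.add st.1 w, w)
      else st)
    ((PySem.Set.ofList [""] : PySem.Set String), "")).2

-- ===== PORT B =====
def longestWord2_alt (words : List String) : String :=
  let present : PySem.Set String := PySem.Set.ofList words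
  words.foldl
    (fun best w =>
      if (PySem.List.pyRange 1 (PySem.Str.len w) 1).all
           (fun i => PySem.Set.contains present (PySem.Str.slice w none (some i))) then
        if PySem.Str.len best < PySem.Str.len w ∨
           (PySem.Str.len w = PySem.Str.len best ∧ w < best) then w else best
      else best)
    ""

-- ===== PRECONDITION & SPEC =====
def Spec_longestWord2 (words : List String) (out : String) : Prop := out = longestWord2_alt words
instance (words : List String) (out : String) : Decidable (Spec_longestWord2 words out) := by unfold Spec_longestWord2; infer_instance

-- ===== CLAIM (what is proved, stated in full; the proofs are below) =====
def Claim_equal_longestWord2 : Prop := ∀ (words : List String), Dom_longestWord2 words → Spec_longestWord2 words (longestWord2 words)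

-- ===== LEMMAS AND PROOFS =====

-- length of a string, as a Nat
def pvNl (w : String) : Nat := w.toList.length
-- the prefix of w of length k, as a String (w[:k] for 0 ≤ k)
def pvPref (w : String) (k : Nat) : String := String.ofList (w.toList.take k)
-- w is "buildable": every proper nonempty prefix of w is itself in W
def pvChain (W : List String) (w : String) : Prop :=
  ∀ k : Nat, 1 ≤ k → k < pvNl w → pvPref w k ∈ W
-- b may legitimately come after a in A's sorted order (key (-len, word), reverse=True)
def pvAfter (a b : String) : Prop := pvNl a < pvNl b ∨ (pvNl a = pvNl b ∧ b ≤ a)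
-- the answer both programs compute: "" if only "" (or nothing) is buildable, else the
-- longest buildable word, ties broken by lexicographically smallest
def pvIsAns (W : List String) (m : String) : Prop :=
  (m = "" ∨ (m ∈ W ∧ pvChain W m)) ∧
  ∀ w ∈ W, pvChain W w → pvNl w < pvNl m ∨ (pvNl w = pvNl m ∧ m ≤ w)

theorem pvNl_eq_zero {w : String} (h : pvNl w = 0) : w = "" := by
  have : w.toList = [] := List.length_eq_zero_iff.mp h
  exact String.toList_inj.mp (by simp [this])

theorem pvIsAns_unique {W : List String} {m1 m2 : String}
    (h1 : pvIsAns W m1) (h2 : pvIsAns W m2) : m1 = m2 := by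
  rcases h1 with ⟨hm1, hmax1⟩
  rcases h2 with ⟨hm2, hmax2⟩
  rcases hm1 with rfl | ⟨hmem1, hch1⟩
  · rcases hm2 with rfl | ⟨hmem2, hch2⟩
    · rfl
    · have := hmax1 m2 hmem2 hch2
      have h0 : pvNl ("" : String) = 0 := by simp [pvNl]
      have : pvNl m2 = 0 := by omega
      exact (pvNl_eq_zero this).symm
  · rcases hm2 with rfl | ⟨hmem2, hch2⟩
    · have := hmax2 m1 hmem1 hch1
      have h0 : pvNl ("" : String) = 0 := by simp [pvNl]
      have : pvNl m1 = 0 := by omega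
      exact pvNl_eq_zero this
    · have ha := hmax1 m2 hmem2 hch2
      have hb := hmax2 m1 hmem1 hch1
      have hlen : pvNl m1 = pvNl m2 := by omega
      rcases ha with h | ⟨_, hle1⟩
      · omega
      rcases hb with h | ⟨_, hle2⟩
      · omega
      exact le_antisymm hle1 hle2

-- w[:i] as a String equals pvPref w i.toNat, for 0 ≤ i
theorem pvSlice_eq (w : String) (i : Int) (h : 0 ≤ i) :
    PySem.Str.slice w none (some i) = pvPref w i.toNat := by
  apply String.toList_inj.mp
  rw [PySem.Str.toList_slice, PySem.Chars.slice_eq_listSlice, PySem.List.slice_to _ h]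
  simp [pvPref]

theorem pvPref_pref (w : String) (m k : Nat) (h : k ≤ m) :
    pvPref (pvPref w m) k = pvPref w k := by
  simp [pvPref, List.take_take, Nat.min_eq_left h]

theorem pvNl_pref (w : String) (k : Nat) : pvNl (pvPref w k) = min k (pvNl w) := by
  simp [pvNl, pvPref]

-- B's all-prefixes test is pvChain
theorem pvTestB (words : List String) (w : String) :
    ((PySem.List.pyRange 1 (PySem.Str.len w) 1).all
      (fun i => PySem.Set.contains (PySem.Set.ofList words) (PySem.Str.slice w none (some i))) = true)
    ↔ pvChain words w := by
  rw [List.all_eq_true]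
  constructor
  · intro h k hk1 hk2
    have hmem : (k : Int) ∈ PySem.List.pyRange 1 (PySem.Str.len w) 1 := by
      rw [PySem.List.mem_pyRange_one, PySem.Str.len_eq]
      constructor <;> [exact_mod_cast hk1; exact_mod_cast hk2]
    have := h _ hmem
    rw [PySem.Set.contains_iff, PySem.Set.mem_ofList, pvSlice_eq w _ (by positivity)] at this
    simpa using this
  · intro h i hi
    rw [PySem.List.mem_pyRange_one, PySem.Str.len_eq] at hi
    have h0 : 0 ≤ i := by omega
    rw [PySem.Set.contains_iff, PySem.Set.mem_ofList, pvSlice_eq w _ h0]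
    refine h i.toNat (by omega) (by simp only [pvNl]; omega)

-- A's membership test of w[:-1] in the candidates set is pvChain, given that the candidates
-- are exactly the buildable processed words and every strictly shorter word is processed
theorem pvTestA (words procd : List String) (c : PySem.Set String) (w : String)
    (hc : ∀ x, x ∈ c ↔ x = "" ∨ (x ∈ procd ∧ pvChain words x))
    (hsub : ∀ y ∈ procd, y ∈ words)
    (hshort : ∀ y ∈ words, pvNl y < pvNl w → y ∈ procd) :
    (PySem.Set.contains c (PySem.Str.slice w none (some (-1))) = true) ↔ pvChain words w := by
  have hd : PySem.Str.slice w none (some (-1)) = pvPref w (pvNl w - 1) := by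
    apply String.toList_inj.mp
    rw [PySem.Str.slice_to_neg_one, List.dropLast_eq_take]
    simp [pvPref, pvNl]
  rw [PySem.Set.contains_iff, hc, hd]
  by_cases hn : pvNl w ≤ 1
  · have hpe : pvPref w (pvNl w - 1) = "" := by
      apply pvNl_eq_zero; rw [pvNl_pref]; omega
    have hch : pvChain words w := by intro k hk1 hk2; omega
    simp [hpe, hch]
  · push Not at hn
    have hne : pvPref w (pvNl w - 1) ≠ "" := by
      intro h
      have h2 := congrArg pvNl h
      rw [pvNl_pref] at h2
      have h3 : pvNl ("" : String) = 0 := by simp [pvNl]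
      omega
    have hnd : pvNl (pvPref w (pvNl w - 1)) = pvNl w - 1 := by rw [pvNl_pref]; omega
    constructor
    · rintro (h | ⟨hp, hcd⟩)
      · exact absurd h hne
      · intro k hk1 hk2
        by_cases hk : k = pvNl w - 1
        · subst hk; exact hsub _ hp
        · have : pvPref w k = pvPref (pvPref w (pvNl w - 1)) k := (pvPref_pref w _ k (by omega)).symm
          rw [this]
          exact hcd k hk1 (by omega)
    · intro hcw
      right
      have hdw : pvPref w (pvNl w - 1) ∈ words := hcw (pvNl w - 1) (by omega) (by omega)
      refine ⟨hshort _ hdw (by omega), ?_⟩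
      intro k hk1 hk2
      rw [pvPref_pref w _ k (by omega)]
      exact hcw k hk1 (by omega)

-- the loop bodies of the two ports, named for the proofs
def pvStepB (words : List String) (best w : String) : String :=
  if (PySem.List.pyRange 1 (PySem.Str.len w) 1).all
       (fun i => PySem.Set.contains (PySem.Set.ofList words) (PySem.Str.slice w none (some i))) then
    if PySem.Str.len best < PySem.Str.len w ∨
       (PySem.Str.len w = PySem.Str.len best ∧ w < best) then w else best
  else best

def pvStepA (st : PySem.Set String × String) (w : String) : PySem.Set String × String :=
  if PySem.Set.contains st.1 (PySem.Str.slice w none (some (-1))) then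
    (PySem.Set.add st.1 w, w)
  else st

theorem pvLen_cast (x : String) : PySem.Str.len x = (pvNl x : Int) := by
  rw [PySem.Str.len_eq]; rfl

-- B strictly improves on b with w
def pvBetter (b w : String) : Prop := pvNl b < pvNl w ∨ (pvNl w = pvNl b ∧ w < b)

theorem pvBetter_iff (b w : String) :
    (PySem.Str.len b < PySem.Str.len w ∨ (PySem.Str.len w = PySem.Str.len b ∧ w < b)) ↔ pvBetter b w := by
  rw [pvLen_cast, pvLen_cast, pvBetter]
  constructor
  · rintro (h | ⟨h1, h2⟩)
    · exact Or.inl (by exact_mod_cast h)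
    · exact Or.inr ⟨by exact_mod_cast h1, h2⟩
  · rintro (h | ⟨h1, h2⟩)
    · exact Or.inl (by exact_mod_cast h)
    · exact Or.inr ⟨by exact_mod_cast h1, h2⟩

-- invariant of B's single pass
theorem pvFoldB (words : List String) (l : List String) (b : String) :
    (l.foldl (pvStepB words) b = b ∨
      (l.foldl (pvStepB words) b ∈ l ∧ pvChain words (l.foldl (pvStepB words) b))) ∧
    (∀ w ∈ l, pvChain words w →
      pvNl w < pvNl (l.foldl (pvStepB words) b) ∨
      (pvNl w = pvNl (l.foldl (pvStepB words) b) ∧ l.foldl (pvStepB words) b ≤ w)) ∧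
    (pvNl b < pvNl (l.foldl (pvStepB words) b) ∨
      (pvNl b = pvNl (l.foldl (pvStepB words) b) ∧ l.foldl (pvStepB words) b ≤ b)) := by
  induction l generalizing b with
  | nil => exact ⟨Or.inl rfl, by simp, Or.inr ⟨rfl, le_refl b⟩⟩
  | cons w t ih =>
    rw [List.foldl_cons]
    obtain ⟨ih1, ih2, ih3⟩ := ih (pvStepB words b w)
    by_cases hch : pvChain words w
    · by_cases hbet : PySem.Str.len b < PySem.Str.len w ∨ (PySem.Str.len w = PySem.Str.len b ∧ w < b)
      · have hb' : pvStepB words b w = w := by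
          rw [pvStepB, if_pos ((pvTestB words w).mpr hch), if_pos hbet]
        rw [hb'] at ih1 ih2 ih3 ⊢
        have hbw := (pvBetter_iff b w).mp hbet
        refine ⟨?_, ?_, ?_⟩
        · rcases ih1 with h | ⟨h1, h2⟩
          · exact Or.inr ⟨by rw [h]; exact List.mem_cons_self, by rw [h]; exact hch⟩
          · exact Or.inr ⟨List.mem_cons_of_mem w h1, h2⟩
        · intro x hx hchx
          rcases List.mem_cons.mp hx with rfl | hxt
          · exact ih3
          · exact ih2 x hxt hchx
        · rcases ih3 with h | ⟨h1, h2⟩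
          · rcases hbw with h' | ⟨h1', h2'⟩ <;> [exact Or.inl (by omega); exact Or.inl (by omega)]
          · rcases hbw with h' | ⟨h1', h2'⟩
            · exact Or.inl (by omega)
            · exact Or.inr ⟨by omega, le_trans h2 (le_of_lt h2')⟩
      · have hb' : pvStepB words b w = b := by
          rw [pvStepB, if_pos ((pvTestB words w).mpr hch), if_neg hbet]
        rw [hb'] at ih1 ih2 ih3 ⊢
        have hnb : ¬ pvBetter b w := fun h => hbet ((pvBetter_iff b w).mpr h)
        rw [pvBetter, not_or, not_and_or, not_lt] at hnb
        obtain ⟨hn1, hn2⟩ := hnb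
        refine ⟨?_, ?_, ih3⟩
        · rcases ih1 with h | ⟨h1, h2⟩
          · exact Or.inl h
          · exact Or.inr ⟨List.mem_cons_of_mem w h1, h2⟩
        · intro x hx hchx
          rcases List.mem_cons.mp hx with rfl | hxt
          · -- ¬better b x, combine with ih3
            rcases ih3 with h | ⟨h1, h2⟩
            · exact Or.inl (by omega)
            · rcases hn2 with h' | h'
              · exact Or.inl (by omega)
              · have hbx : b ≤ x := not_lt.mp h'
                rcases lt_or_eq_of_le hn1 with hlt | heq
                · exact Or.inl (by omega)
                · exact Or.inr ⟨by omega, le_trans h2 hbx⟩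
          · exact ih2 x hxt hchx
    · have hb' : pvStepB words b w = b := by
        rw [pvStepB, if_neg (fun h => hch ((pvTestB words w).mp h))]
      rw [hb'] at ih1 ih2 ih3 ⊢
      refine ⟨?_, ?_, ih3⟩
      · rcases ih1 with h | ⟨h1, h2⟩
        · exact Or.inl h
        · exact Or.inr ⟨List.mem_cons_of_mem w h1, h2⟩
      · intro x hx hchx
        rcases List.mem_cons.mp hx with rfl | hxt
        · exact absurd hchx hch
        · exact ih2 x hxt hchx

theorem pvB_ans (words : List String) : pvIsAns words (longestWord2_alt words) := by
  have hport : longestWord2_alt words = words.foldl (pvStepB words) "" := rfl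
  obtain ⟨h1, h2, _⟩ := pvFoldB words words ""
  rw [hport]
  exact ⟨h1, h2⟩

-- invariant of A's pass over the sorted list
theorem pvFoldA (words : List String) (rest : List String) :
    ∀ (procd : List String) (c : PySem.Set String) (l : String),
    (∀ x, x ∈ words ↔ x ∈ procd ∨ x ∈ rest) →
    (∀ a ∈ procd, ∀ b ∈ rest, pvAfter a b) →
    rest.Pairwise pvAfter →
    (∀ x, x ∈ c ↔ x = "" ∨ (x ∈ procd ∧ pvChain words x)) →
    (l = "" ∨ (l ∈ procd ∧ pvChain words l)) →
    (∀ x ∈ procd, pvChain words x → pvNl x < pvNl l ∨ (pvNl x = pvNl l ∧ l ≤ x)) →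
    pvIsAns words ((rest.foldl pvStepA (c, l)).2) := by
  induction rest with
  | nil =>
    intro procd c l hmem _ _ _ hl hmax
    simp only [List.foldl_nil]
    refine ⟨?_, ?_⟩
    · rcases hl with h | ⟨hm, hc'⟩
      · exact Or.inl h
      · exact Or.inr ⟨(hmem l).mpr (Or.inl hm), hc'⟩
    · intro x hx hchx
      have := (hmem x).mp hx
      simp only [List.not_mem_nil, or_false] at this
      exact hmax x this hchx
  | cons w t ih =>
    intro procd c l hmem hcross hsort hc hl hmax
    rw [List.foldl_cons]
    have hsub : ∀ y ∈ procd, y ∈ words := fun y hy => (hmem y).mpr (Or.inl hy)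
    obtain ⟨hw_t, hsort'⟩ := List.pairwise_cons.mp hsort
    have hshort : ∀ y ∈ words, pvNl y < pvNl w → y ∈ procd := by
      intro y hy hlt
      rcases (hmem y).mp hy with h | h
      · exact h
      · rcases List.mem_cons.mp h with rfl | hyt
        · omega
        · rcases hw_t y hyt with h' | ⟨h', _⟩ <;> omega
    have htest := pvTestA words procd c w hc hsub hshort
    have hmem' : ∀ x, x ∈ words ↔ x ∈ procd ++ [w] ∨ x ∈ t := by
      intro x
      rw [hmem x, List.mem_append, List.mem_cons, List.mem_singleton]
      tauto
    have hcross' : ∀ a ∈ procd ++ [w], ∀ b ∈ t, pvAfter a b := by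
      intro a ha b hb
      rcases List.mem_append.mp ha with h | h
      · exact hcross a h b (List.mem_cons_of_mem w hb)
      · rw [List.mem_singleton] at h; subst h; exact hw_t b hb
    by_cases hch : pvChain words w
    · have hstep : pvStepA (c, l) w = (PySem.Set.add c w, w) := by
        rw [pvStepA, if_pos (htest.mpr hch)]
      rw [hstep]
      apply ih (procd ++ [w]) _ _ hmem' hcross' hsort'
      · intro x
        rw [PySem.Set.mem_add, hc x, List.mem_append, List.mem_singleton]
        constructor
        · rintro ((h | ⟨h1, h2⟩) | rfl)
          · exact Or.inl h
          · exact Or.inr ⟨Or.inl h1, h2⟩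
          · exact Or.inr ⟨Or.inr rfl, hch⟩
        · rintro (h | ⟨h1 | rfl, h2⟩)
          · exact Or.inl (Or.inl h)
          · exact Or.inl (Or.inr ⟨h1, h2⟩)
          · exact Or.inr rfl
      · exact Or.inr ⟨List.mem_append_right procd (List.mem_singleton.mpr rfl), hch⟩
      · intro x hx hchx
        rcases List.mem_append.mp hx with h | h
        · exact hcross x h w List.mem_cons_self
        · rw [List.mem_singleton] at h; subst h
          exact Or.inr ⟨rfl, le_rfl⟩
    · have hstep : pvStepA (c, l) w = (c, l) := by
        rw [pvStepA, if_neg (fun h => hch (htest.mp h))]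
      rw [hstep]
      apply ih (procd ++ [w]) _ _ hmem' hcross' hsort'
      · intro x
        rw [hc x, List.mem_append, List.mem_singleton]
        constructor
        · rintro (h | ⟨h1, h2⟩)
          · exact Or.inl h
          · exact Or.inr ⟨Or.inl h1, h2⟩
        · rintro (h | ⟨h1 | rfl, h2⟩)
          · exact Or.inl h
          · exact Or.inr ⟨h1, h2⟩
          · exact absurd h2 hch
      · rcases hl with h | ⟨h1, h2⟩
        · exact Or.inl h
        · exact Or.inr ⟨List.mem_append_left _ h1, h2⟩
      · intro x hx hchx
        rcases List.mem_append.mp hx with h | h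
        · exact hmax x h hchx
        · rw [List.mem_singleton] at h; subst h
          exact absurd hchx hch

def pvKey (x : String) : Lex (Int × String) := toLex (-(PySem.Str.len x), x)

theorem pvKey_le {a b : String} (h : pvKey b ≤ pvKey a) : pvAfter a b := by
  rw [pvKey, pvKey, Prod.Lex.le_iff] at h
  simp only [ofLex_toLex] at h
  rw [pvLen_cast, pvLen_cast] at h
  rcases h with h | ⟨h1, h2⟩
  · exact Or.inl (by omega)
  · exact Or.inr ⟨by omega, h2⟩

theorem pvFoldInsert (l : List String) :
    ∀ acc : List String, acc.Pairwise (fun a b => pvKey b ≤ pvKey a) →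
    (l.foldl (fun acc x => PySem.List.insertBy (fun a b => decide (pvKey b < pvKey a)) x acc) acc).Pairwise
      (fun a b => pvKey b ≤ pvKey a) := by
  induction l with
  | nil => intro acc h; exact h
  | cons x t ih =>
    intro acc h
    rw [List.foldl_cons]
    exact ih _ (PySem.List.insertBy_pairwise_ge pvKey x acc h)

theorem pvSorted_eq (words : List String) :
    PySem.List.sorted2 words (fun x => -(PySem.Str.len x)) (fun x => x) true =
      words.foldl (fun acc x => PySem.List.insertBy (fun a b => decide (pvKey b < pvKey a)) x acc) [] := by
  have hfun : (fun a b : String =>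
      decide ((-(PySem.Str.len b)) < -(PySem.Str.len a)) ||
        (!decide ((-(PySem.Str.len a)) < -(PySem.Str.len b)) && decide (b < a))) =
      (fun a b : String => decide (pvKey b < pvKey a)) := by
    funext a b
    have hiff : (pvKey b < pvKey a) ↔
        ((-(PySem.Str.len b) < -(PySem.Str.len a)) ∨
          (¬(-(PySem.Str.len a) < -(PySem.Str.len b)) ∧ b < a)) := by
      rw [pvKey, pvKey, Prod.Lex.lt_iff]
      simp only [ofLex_toLex]
      constructor
      · rintro (h | ⟨h1, h2⟩)
        · exact Or.inl h
        · exact Or.inr ⟨by omega, h2⟩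
      · rintro (h | ⟨h1, h2⟩)
        · exact Or.inl h
        · by_cases hlt : (-(PySem.Str.len b) : Int) < -(PySem.Str.len a)
          · exact Or.inl hlt
          · exact Or.inr ⟨by omega, h2⟩
    rw [decide_eq_decide.mpr hiff]
    by_cases hA : (-(PySem.Str.len b) : Int) < -(PySem.Str.len a) <;>
      by_cases hC : b < a <;>
        by_cases hB : (-(PySem.Str.len a) : Int) < -(PySem.Str.len b) <;>
          simp [hA, hB, hC, ← decide_not, Nat.not_lt]
    infer_instance
  rw [← hfun]
  rfl

theorem pvSorted_pairwise (words : List String) :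
    (PySem.List.sorted2 words (fun x => -(PySem.Str.len x)) (fun x => x) true).Pairwise pvAfter := by
  rw [pvSorted_eq]
  exact (pvFoldInsert words [] List.Pairwise.nil).imp (fun h => pvKey_le h)

theorem pvA_ans (words : List String) : pvIsAns words (longestWord2 words) := by
  have hport : longestWord2 words =
      ((PySem.List.sorted2 words (fun x => -(PySem.Str.len x)) (fun x => x) true).foldl
        pvStepA (PySem.Set.ofList [""], "")).2 := rfl
  rw [hport]
  apply pvFoldA words _ [] _ _
  · intro x
    simp only [List.not_mem_nil, false_or]
    exact ((PySem.List.sorted2_perm words _ _ true).mem_iff).symm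
  · intro a ha; exact absurd ha (List.not_mem_nil)
  · exact pvSorted_pairwise words
  · intro x
    rw [PySem.Set.mem_ofList]
    simp
  · exact Or.inl rfl
  · intro x hx; exact absurd hx (List.not_mem_nil)

-- ===== VERDICT (by name: the statement is the Claim_ definition above) =====
theorem longestWord2_spec : Claim_equal_longestWord2 := by
  intro words _
  unfold Spec_longestWord2
  exact pvIsAns_unique (pvA_ans words) (pvB_ans words)
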